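-- pv_equiv track=rewrite | github.com/SlavaAlferov/Working | Программирование/Блок_6/Task_2.py | get_unique_subsets
-- ===== SOURCE A (Python) =====
-- from itertools import combinations
--
-- def get_unique_subsets(elements):
--     """
--     Генерирует все уникальные подмножества из списка элементов (без повторений)
--     и возвращает их в отсортированном виде с количеством.
--     """
--     # Удаляем дубликаты, сохраняя порядок (если важно)
--     unique_elements = list(dict.fromkeys(elements))
--
--     # Генерируем все возможные подмножества (кроме пустого)
--     subsets = set()  # Используем множество для автоматического удаления дублей
--
--     for r in range(1, len(unique_elements) + 1):
--         for combo in combinations(unique_elements, r):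
--             # Сортируем и преобразуем в строку без лишних символов
--             sorted_str = "".join(sorted(map(str, combo)))
--             subsets.add(sorted_str)
--
--     # Сортируем подмножества по длине, затем по значению
--     sorted_subsets = sorted(subsets, key=lambda x: (len(x), x))
--
--     return sorted_subsets, len(sorted_subsets)
-- ===== SOURCE B (Python) =====
-- def get_unique_subsets(elements):
--     # iterative powerset over the deduplicated elements, then one dedup/sort pass
--     uniq = list(dict.fromkeys(elements))
--     subsets = [[]]
--     for e in uniq:
--         subsets = subsets + [s + [e] for s in subsets]
--     strings = set()
--     for s in subsets:
--         if s:
--             strings.add("".join(sorted(s)))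
--     out = sorted(strings, key=lambda x: (len(x), x))
--     return out, len(out)
-- ===== Notes on version B (the rewrite author's own statement) =====
-- stated objective: alternative
-- what changed: Replaces the per-size itertools.combinations loops with an iteratively grown powerset worklist, followed by a single filter/dedup/sort pass over all subsets.
import Mathlib
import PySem

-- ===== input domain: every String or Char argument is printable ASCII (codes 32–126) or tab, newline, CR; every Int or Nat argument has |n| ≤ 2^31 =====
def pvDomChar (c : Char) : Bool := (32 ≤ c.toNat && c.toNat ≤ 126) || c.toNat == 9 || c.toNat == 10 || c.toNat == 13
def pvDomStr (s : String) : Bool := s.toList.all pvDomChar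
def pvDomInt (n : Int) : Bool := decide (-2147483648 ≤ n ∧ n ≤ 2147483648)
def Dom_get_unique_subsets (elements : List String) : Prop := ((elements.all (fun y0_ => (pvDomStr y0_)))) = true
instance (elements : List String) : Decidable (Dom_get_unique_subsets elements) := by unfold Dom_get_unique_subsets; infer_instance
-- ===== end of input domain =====

-- B replaces the per-size combinations loops by an iteratively grown powerset worklist
-- plus one filter/dedup/sort pass; same cost class, different decomposition (objective: alternative).

-- ===== PORT A =====
def get_unique_subsets (elements : List String) : List String × Int :=
  let unique_elements := PySem.List.dedup elements
  let subsets : PySem.Set String :=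
    (PySem.List.pyRange 1 ((unique_elements.length : Int) + 1) 1).foldl
      (fun s r =>
        (PySem.List.combinations unique_elements r.toNat).foldl
          (fun s combo =>
            PySem.Set.add s (PySem.Str.join "" (PySem.List.sorted combo (fun x => x) false))) s)
      PySem.Set.empty
  let sorted_subsets :=
    PySem.List.sorted2 subsets (fun x => PySem.Str.len x) (fun x => x) false
  (sorted_subsets, (sorted_subsets.length : Int))

-- ===== PORT B =====
def get_unique_subsets_alt (elements : List String) : List String × Int :=
  let uniq := PySem.List.dedup elements
  let subsets := uniq.foldl (fun acc e => acc ++ acc.map (fun s => s ++ [e])) [[]]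
  let strings : PySem.Set String :=
    subsets.foldl
      (fun st s =>
        if s ≠ [] then
          PySem.Set.add st (PySem.Str.join "" (PySem.List.sorted s (fun x => x) false))
        else st)
      PySem.Set.empty
  let out := PySem.List.sorted2 strings (fun x => PySem.Str.len x) (fun x => x) false
  (out, (out.length : Int))

-- ===== PRECONDITION & SPEC =====
def Spec_get_unique_subsets (elements : List String) (out : List String × Int) : Prop := out = get_unique_subsets_alt elements
instance (elements : List String) (out : List String × Int) : Decidable (Spec_get_unique_subsets elements out) := by unfold Spec_get_unique_subsets; infer_instance

-- ===== CLAIM (what is proved, stated in full; the proofs are below) =====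
def Claim_equal_get_unique_subsets : Prop := ∀ (elements : List String), Dom_get_unique_subsets elements → Spec_get_unique_subsets elements (get_unique_subsets elements)

-- ===== LEMMAS AND PROOFS =====

-- the string a subset is rendered to
def pvStr (c : List String) : String :=
  PySem.Str.join "" (PySem.List.sorted c (fun x => x) false)

-- the strict "before" order sorted2 uses with key (len x, x)
def pvLt (a b : String) : Bool :=
  decide (PySem.Str.len a < PySem.Str.len b) ||
    !decide (PySem.Str.len b < PySem.Str.len a) && decide (a < b)

theorem pvLt_iff (a b : String) :
    pvLt a b = true ↔ (PySem.Str.len a < PySem.Str.len b ∨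
      (¬ PySem.Str.len b < PySem.Str.len a ∧ a < b)) := by
  simp [pvLt]

theorem pvLt_asymm {a b : String} (h : pvLt a b = true) : pvLt b a = false := by
  rw [pvLt_iff] at h
  rw [Bool.eq_false_iff, Ne, pvLt_iff]
  rcases h with h | ⟨h1, h2⟩
  · rintro (h' | ⟨h1', _⟩)
    · exact absurd h (lt_asymm h')
    · exact h1' h
  · rintro (h' | ⟨_, h2'⟩)
    · exact h1 h'
    · exact absurd h2 (lt_asymm h2')

theorem pvLt_trans {a b c : String} (h1 : pvLt a b = true) (h2 : pvLt b c = true) :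
    pvLt a c = true := by
  rw [pvLt_iff] at h1 h2 ⊢
  rcases h1 with h1 | ⟨h1a, h1b⟩ <;> rcases h2 with h2 | ⟨h2a, h2b⟩
  · exact Or.inl (lt_trans h1 h2)
  · exact Or.inl (lt_of_lt_of_le h1 (not_lt.mp h2a))
  · exact Or.inl (lt_of_le_of_lt (not_lt.mp h1a) h2)
  · exact Or.inr ⟨fun h => h1a (lt_of_le_of_lt (not_lt.mp h2a) h), lt_trans h1b h2b⟩

-- the (non-strict) order the result is sorted by
def pvLe (a b : String) : Prop := pvLt b a = false

theorem pvLe_antisymm {a b : String} (h1 : pvLe a b) (h2 : pvLe b a) : a = b := by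
  unfold pvLe at h1 h2
  rw [Bool.eq_false_iff, Ne, pvLt_iff] at h1 h2
  push Not at h1 h2
  exact le_antisymm (not_lt.mp (h1.2 h2.1)) (not_lt.mp (h2.2 h1.1))

theorem pairwise_insertBy_pvLt {x : String} {ys : List String}
    (h : ys.Pairwise pvLe) : (PySem.List.insertBy pvLt x ys).Pairwise pvLe := by
  induction ys with
  | nil => simp [PySem.List.insertBy, pvLe]
  | cons y ys ih =>
    rw [List.pairwise_cons] at h
    simp only [PySem.List.insertBy]
    split
    · rename_i hxy
      refine List.Pairwise.cons ?_ (List.Pairwise.cons h.1 h.2)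
      intro z hz
      rcases List.mem_cons.mp hz with rfl | hz
      · exact pvLt_asymm hxy
      · have hzy : pvLt z y = false := h.1 z hz
        unfold pvLe
        rw [Bool.eq_false_iff]
        intro hzx
        exact absurd (pvLt_trans hzx hxy) (by rw [hzy]; simp)
    · rename_i hxy
      refine List.Pairwise.cons ?_ (ih h.2)
      intro z hz
      rcases (PySem.List.mem_insertBy _ _ _ _).mp hz with rfl | hz
      · exact Bool.eq_false_iff.mpr hxy
      · exact h.1 z hz

theorem pairwise_foldl_insertBy (l : List String) (init : List String)
    (h : init.Pairwise pvLe) :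
    (l.foldl (fun acc x => PySem.List.insertBy pvLt x acc) init).Pairwise pvLe := by
  induction l generalizing init with
  | nil => exact h
  | cons x l ih => exact ih _ (pairwise_insertBy_pvLt h)

theorem sorted2_eq_foldl (xs : List String) :
    PySem.List.sorted2 xs (fun x => PySem.Str.len x) (fun x => x) false =
      xs.foldl (fun acc x => PySem.List.insertBy pvLt x acc) [] := rfl

theorem pairwise_sorted2 (xs : List String) :
    (PySem.List.sorted2 xs (fun x => PySem.Str.len x) (fun x => x) false).Pairwise pvLe := by
  rw [sorted2_eq_foldl]
  exact pairwise_foldl_insertBy xs [] (List.Pairwise.nil)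

-- sorted2 depends only on the elements, for Nodup lists with the same members
theorem sorted2_eq_of_mem_iff {xs ys : List String} (hx : xs.Nodup) (hy : ys.Nodup)
    (h : ∀ a, a ∈ xs ↔ a ∈ ys) :
    PySem.List.sorted2 xs (fun x => PySem.Str.len x) (fun x => x) false =
      PySem.List.sorted2 ys (fun x => PySem.Str.len x) (fun x => x) false := by
  have hperm : xs.Perm ys := (List.perm_ext_iff_of_nodup hx hy).mpr h
  have hp : (PySem.List.sorted2 xs (fun x => PySem.Str.len x) (fun x => x) false).Perm
      (PySem.List.sorted2 ys (fun x => PySem.Str.len x) (fun x => x) false) :=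
    ((PySem.List.sorted2_perm xs _ _ false).trans hperm).trans
      (PySem.List.sorted2_perm ys _ _ false).symm
  exact hp.eq_of_pairwise (fun a b _ _ h1 h2 => pvLe_antisymm h1 h2)
    (pairwise_sorted2 xs) (pairwise_sorted2 ys)

-- A's inner loop is a Set.update with the rendered combinations
theorem inner_fold_eq_update (l : List (List String)) (s : PySem.Set String) :
    l.foldl (fun s combo =>
        PySem.Set.add s (PySem.Str.join "" (PySem.List.sorted combo (fun x => x) false))) s =
      PySem.Set.update s (l.map pvStr) := by
  simp [PySem.Set.update, List.foldl_map, pvStr]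

-- membership in a fold of Set.updates
theorem mem_foldl_update (g : Int → List String) (rs : List Int) (s0 : PySem.Set String)
    (x : String) :
    x ∈ rs.foldl (fun s r => PySem.Set.update s (g r)) s0 ↔
      x ∈ s0 ∨ ∃ r ∈ rs, x ∈ g r := by
  induction rs generalizing s0 with
  | nil => simp
  | cons r rs ih =>
    simp only [List.foldl_cons, ih, PySem.Set.mem_update, List.mem_cons]
    constructor
    · rintro ((h | h) | ⟨r', hr', h⟩)
      · exact Or.inl h
      · exact Or.inr ⟨r, Or.inl rfl, h⟩
      · exact Or.inr ⟨r', Or.inr hr', h⟩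
    · rintro (h | ⟨r', (rfl | hr'), h⟩)
      · exact Or.inl (Or.inl h)
      · exact Or.inl (Or.inr h)
      · exact Or.inr ⟨r', hr', h⟩

theorem nodup_foldl_update (g : Int → List String) (rs : List Int) (s0 : PySem.Set String)
    (h : s0.Nodup) : (rs.foldl (fun s r => PySem.Set.update s (g r)) s0).Nodup := by
  induction rs generalizing s0 with
  | nil => exact h
  | cons r rs ih => exact ih _ (PySem.Set.nodup_update s0 (g r) h)

-- B's worklist builds exactly the sublists
theorem mem_powfold (l : List String) (acc : List (List String)) (x : List String) :
    x ∈ l.foldl (fun acc e => acc ++ acc.map (fun s => s ++ [e])) acc ↔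
      ∃ y ∈ acc, ∃ t, t.Sublist l ∧ x = y ++ t := by
  induction l generalizing acc with
  | nil =>
    simp only [List.foldl_nil, List.sublist_nil]
    constructor
    · intro h; exact ⟨x, h, [], rfl, by simp⟩
    · rintro ⟨y, hy, t, rfl, rfl⟩; simpa using hy
  | cons e l ih =>
    simp only [List.foldl_cons, ih]
    constructor
    · rintro ⟨y, hy, t, ht, rfl⟩
      rcases List.mem_append.mp hy with hy | hy
      · exact ⟨y, hy, t, ht.cons e, rfl⟩
      · rcases List.mem_map.mp hy with ⟨z, hz, rfl⟩
        exact ⟨z, hz, e :: t, (List.sublist_cons_iff).mpr (Or.inr ⟨t, rfl, ht⟩),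
          by simp⟩
    · rintro ⟨y, hy, t, ht, rfl⟩
      rcases (List.sublist_cons_iff).mp ht with ht | ⟨t', rfl, ht'⟩
      · exact ⟨y, List.mem_append.mpr (Or.inl hy), t, ht, rfl⟩
      · refine ⟨y ++ [e], List.mem_append.mpr (Or.inr (List.mem_map.mpr ⟨y, hy, rfl⟩)),
          t', ht', by simp⟩

-- membership in A's set of strings
theorem mem_setA (uniq : List String) (x : String) :
    x ∈ (PySem.List.pyRange 1 ((uniq.length : Int) + 1) 1).foldl
        (fun s r =>
          (PySem.List.combinations uniq r.toNat).foldl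
            (fun s combo =>
              PySem.Set.add s
                (PySem.Str.join "" (PySem.List.sorted combo (fun x => x) false))) s)
        PySem.Set.empty ↔
      ∃ c, c.Sublist uniq ∧ c ≠ [] ∧ x = pvStr c := by
  have hfold :
      (PySem.List.pyRange 1 ((uniq.length : Int) + 1) 1).foldl
        (fun s r =>
          (PySem.List.combinations uniq r.toNat).foldl
            (fun s combo =>
              PySem.Set.add s
                (PySem.Str.join "" (PySem.List.sorted combo (fun x => x) false))) s)
        PySem.Set.empty =
      (PySem.List.pyRange 1 ((uniq.length : Int) + 1) 1).foldl
        (fun s r => PySem.Set.update s ((PySem.List.combinations uniq r.toNat).map pvStr))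
        PySem.Set.empty := by
    refine PySem.List.foldl_congr_mem _ _ _ _ (fun acc r _ => ?_)
    exact inner_fold_eq_update _ acc
  rw [hfold, mem_foldl_update]
  simp only [PySem.Set.empty, List.not_mem_nil, false_or, List.mem_map,
    PySem.List.mem_combinations_iff, PySem.List.mem_pyRange_one]
  constructor
  · rintro ⟨r, ⟨hr1, hr2⟩, c, ⟨hsub, hlen⟩, rfl⟩
    refine ⟨c, hsub, ?_, rfl⟩
    intro hc
    rw [hc] at hlen
    simp at hlen
    omega
  · rintro ⟨c, hsub, hne, rfl⟩
    refine ⟨(c.length : Int), ⟨?_, ?_⟩, c, ⟨hsub, by simp⟩, rfl⟩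
    · have : 0 < c.length := List.length_pos_iff.mpr hne
      omega
    · have := hsub.length_le
      omega

-- membership in B's set of strings
theorem mem_setB (subsets : List (List String)) (x : String) :
    x ∈ subsets.foldl
        (fun st s =>
          if s ≠ [] then
            PySem.Set.add st (PySem.Str.join "" (PySem.List.sorted s (fun x => x) false))
          else st)
        PySem.Set.empty ↔
      ∃ s ∈ subsets, s ≠ [] ∧ x = pvStr s := by
  rw [PySem.List.foldl_ite_eq_foldl_filter (p := fun s : List String => s ≠ [])]
  rw [inner_fold_eq_update]
  simp only [PySem.Set.mem_update, PySem.Set.empty, List.not_mem_nil, false_or,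
    List.mem_map, List.mem_filter, decide_eq_true_eq]
  constructor
  · rintro ⟨s, ⟨hs, hne⟩, rfl⟩; exact ⟨s, hs, hne, rfl⟩
  · rintro ⟨s, hs, hne, rfl⟩; exact ⟨s, ⟨hs, hne⟩, rfl⟩

theorem nodup_setB (subsets : List (List String)) :
    (subsets.foldl
        (fun st s =>
          if s ≠ [] then
            PySem.Set.add st (PySem.Str.join "" (PySem.List.sorted s (fun x => x) false))
          else st)
        PySem.Set.empty).Nodup := by
  rw [PySem.List.foldl_ite_eq_foldl_filter (p := fun s : List String => s ≠ [])]
  rw [inner_fold_eq_update]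
  exact PySem.Set.nodup_update _ _ (by simp [PySem.Set.empty])

-- ===== VERDICT (by name: the statement is the Claim_ definition above) =====
theorem get_unique_subsets_spec : Claim_equal_get_unique_subsets := by
  intro elements _
  unfold Spec_get_unique_subsets get_unique_subsets get_unique_subsets_alt
  simp only []
  set uniq := PySem.List.dedup elements with huniq
  set subsets := uniq.foldl (fun acc e => acc ++ acc.map (fun s => s ++ [e])) [[]] with hsubsets
  have hA := mem_setA uniq
  have hB := mem_setB subsets
  have hAnodup : ((PySem.List.pyRange 1 ((uniq.length : Int) + 1) 1).foldl
      (fun s r =>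
        (PySem.List.combinations uniq r.toNat).foldl
          (fun s combo =>
            PySem.Set.add s
              (PySem.Str.join "" (PySem.List.sorted combo (fun x => x) false))) s)
      PySem.Set.empty).Nodup := by
    have hfold :
        (PySem.List.pyRange 1 ((uniq.length : Int) + 1) 1).foldl
          (fun s r =>
            (PySem.List.combinations uniq r.toNat).foldl
              (fun s combo =>
                PySem.Set.add s
                  (PySem.Str.join "" (PySem.List.sorted combo (fun x => x) false))) s)
          PySem.Set.empty =
        (PySem.List.pyRange 1 ((uniq.length : Int) + 1) 1).foldl
          (fun s r => PySem.Set.update s ((PySem.List.combinations uniq r.toNat).map pvStr))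
          PySem.Set.empty := by
      refine PySem.List.foldl_congr_mem _ _ _ _ (fun acc r _ => ?_)
      exact inner_fold_eq_update _ acc
    rw [hfold]
    exact nodup_foldl_update _ _ _ (by simp [PySem.Set.empty])
  have hmem : ∀ a, a ∈ (PySem.List.pyRange 1 ((uniq.length : Int) + 1) 1).foldl
      (fun s r =>
        (PySem.List.combinations uniq r.toNat).foldl
          (fun s combo =>
            PySem.Set.add s
              (PySem.Str.join "" (PySem.List.sorted combo (fun x => x) false))) s)
      PySem.Set.empty ↔
      a ∈ subsets.foldl
        (fun st s =>
          if s ≠ [] then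
            PySem.Set.add st (PySem.Str.join "" (PySem.List.sorted s (fun x => x) false))
          else st)
        PySem.Set.empty := by
    intro a
    rw [hA a, hB a]
    constructor
    · rintro ⟨c, hsub, hne, rfl⟩
      refine ⟨c, ?_, hne, rfl⟩
      rw [hsubsets, mem_powfold]
      exact ⟨[], by simp, c, hsub, rfl⟩
    · rintro ⟨s, hs, hne, rfl⟩
      rw [hsubsets, mem_powfold] at hs
      rcases hs with ⟨y, hy, t, ht, rfl⟩
      simp only [List.mem_singleton] at hy
      subst hy
      exact ⟨t, ht, by simpa using hne, by simp⟩
  have := sorted2_eq_of_mem_iff hAnodup (nodup_setB subsets) hmem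
  rw [this]
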